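-- pv_equiv track=rewrite | github.com/zerocod3r/InterviewQuestions | Hashing/two_out_of_three.py | solve
-- ===== SOURCE A (Python) =====
-- def solve(A, B, C):
--     hs = { i:1 for i in A}
--     B = set(B)
--     C = set(C)
--     for i in B:
--         if i in hs.keys():
--             hs[i] = hs[i] + 1
--         else:
--             hs[i] = 1
--     for i in C:
--         if i in hs.keys():
--             hs[i] = hs[i] + 1
--         else:
--             hs[i] = 1
--     return sorted([int(i) for i in hs.keys() if hs[i] >= 2])
-- ===== SOURCE B (Python) =====
-- def solve(A, B, C):
--     sa, sb, sc = set(A), set(B), set(C)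
--     res = (sa & sb) | (sa & sc) | (sb & sc)
--     return sorted(int(i) for i in res)
-- ===== Notes on version B (the rewrite author's own statement) =====
-- stated objective: simpler
-- what changed: Replaces the per-element dict counting with a >=2 threshold by set algebra: the union of the three pairwise intersections, then sorted.
import Mathlib
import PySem

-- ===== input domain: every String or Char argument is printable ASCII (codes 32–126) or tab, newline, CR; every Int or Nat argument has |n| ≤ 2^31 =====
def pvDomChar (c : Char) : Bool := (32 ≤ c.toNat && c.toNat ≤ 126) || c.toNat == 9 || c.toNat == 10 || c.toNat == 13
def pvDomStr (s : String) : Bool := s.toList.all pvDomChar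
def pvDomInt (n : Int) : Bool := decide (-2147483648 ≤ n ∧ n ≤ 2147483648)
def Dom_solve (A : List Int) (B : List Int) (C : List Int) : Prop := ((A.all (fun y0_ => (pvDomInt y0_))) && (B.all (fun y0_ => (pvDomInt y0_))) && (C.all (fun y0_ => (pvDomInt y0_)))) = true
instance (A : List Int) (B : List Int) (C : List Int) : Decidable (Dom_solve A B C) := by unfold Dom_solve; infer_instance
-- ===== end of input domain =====

-- B replaces A's dict counting with a >=2 threshold by the union of pairwise set
-- intersections; same sorted result (objective: simpler).

-- ===== PORT A =====
-- hs = {i: 1 for i in A}; then two count-or-insert loops over set(B) and set(C);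
-- the dict is only looked up and its keys sorted afterwards, so set iteration order is immaterial.
def solveStep (d : PySem.Dict Int Int) (i : Int) : PySem.Dict Int Int :=
  if d.contains i then d.insert i (d.getD i 0 + 1) else d.insert i 1

def solve (A : List Int) (B : List Int) (C : List Int) : List Int :=
  let hs0 : PySem.Dict Int Int := A.foldl (fun d i => d.insert i 1) PySem.Dict.empty
  let Bs : PySem.Set Int := PySem.Set.ofList B
  let Cs : PySem.Set Int := PySem.Set.ofList C
  let hs1 := Bs.foldl solveStep hs0
  let hs2 := Cs.foldl solveStep hs1
  -- int(i) on an int is the identity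
  PySem.List.sorted ((hs2.keys).filter (fun i => decide (2 ≤ hs2.getD i 0))) (fun x => x) false

-- ===== PORT B =====
def solve_alt (A : List Int) (B : List Int) (C : List Int) : List Int :=
  let sa : PySem.Set Int := PySem.Set.ofList A
  let sb : PySem.Set Int := PySem.Set.ofList B
  let sc : PySem.Set Int := PySem.Set.ofList C
  let res := PySem.Set.union (PySem.Set.union (PySem.Set.inter sa sb) (PySem.Set.inter sa sc)) (PySem.Set.inter sb sc)
  PySem.List.sorted res (fun x => x) false

-- ===== PRECONDITION & SPEC =====
def Spec_solve (A : List Int) (B : List Int) (C : List Int) (out : List Int) : Prop := out = solve_alt A B C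
instance (A : List Int) (B : List Int) (C : List Int) (out : List Int) : Decidable (Spec_solve A B C out) := by unfold Spec_solve; infer_instance

-- ===== CLAIM (what is proved, stated in full; the proofs are below) =====
def Claim_equal_solve : Prop := ∀ (A : List Int) (B : List Int) (C : List Int), Dom_solve A B C → Spec_solve A B C (solve A B C)

-- ===== LEMMAS AND PROOFS =====

-- sorted (id key) depends only on the multiset of elements
theorem sorted_id_congr {xs ys : List Int} (h : xs.Perm ys) :
    PySem.List.sorted xs (fun x => x) false = PySem.List.sorted ys (fun x => x) false :=
  PySem.List.sorted_id_eq_of_perm_of_pairwise xs (PySem.List.sorted ys (fun x => x) false)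
    ((PySem.List.sorted_perm ys (fun x => x) false).trans h.symm)
    (PySem.List.sorted_pairwise ys (fun x => x))

-- the dict comprehension {i: 1 for i in A}
theorem getD_comprehension (A : List Int) (d : PySem.Dict Int Int) (v : Int) :
    (A.foldl (fun d i => d.insert i 1) d).getD v 0 =
      if v ∈ A then 1 else d.getD v 0 := by
  induction A generalizing d with
  | nil => simp
  | cons a t ih =>
    simp only [List.foldl_cons, ih, List.mem_cons]
    rcases Decidable.em (v ∈ t) with h | h
    · simp [h]
    · simp [h, PySem.Dict.getD_insert]

theorem keys_comprehension (A : List Int) :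
    (A.foldl (fun d i => d.insert i 1) (PySem.Dict.empty : PySem.Dict Int Int)).keys
      = PySem.Set.ofList A := by
  have h := PySem.Dict.keys_foldl_insert A (fun _ _ => (1 : Int)) PySem.Dict.empty
  simpa [PySem.Dict.keys_empty, PySem.Set.update_nil_left] using h

theorem solveStep_eq (d : PySem.Dict Int Int) (i : Int) :
    solveStep d i = d.insert i (d.getD i 0 + 1) := by
  unfold solveStep
  rcases h : d.contains i with _ | _
  · simp [PySem.Dict.getD_of_not_contains d 0 h]
  · rfl

theorem foldl_solveStep_eq (l : List Int) (d : PySem.Dict Int Int) :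
    l.foldl solveStep d = l.foldl (fun d x => d.insert x (d.getD x 0 + 1)) d :=
  PySem.List.foldl_congr_mem l _ _ d (fun acc x _ => solveStep_eq acc x)

theorem getD_hs (l : List Int) (d : PySem.Dict Int Int) (v : Int) :
    (l.foldl solveStep d).getD v 0 = d.getD v 0 + l.count v := by
  rw [foldl_solveStep_eq]
  exact PySem.Dict.getD_foldl_insert_add_one l d v

theorem keys_hs (l : List Int) (d : PySem.Dict Int Int) :
    (l.foldl solveStep d).keys = PySem.Set.update d.keys l := by
  rw [foldl_solveStep_eq]
  exact PySem.Dict.keys_foldl_insert l _ d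

-- indicator count of an element in a deduplicated list
theorem count_ofList (xs : List Int) (v : Int) :
    (PySem.Set.ofList xs).count v = if v ∈ xs then 1 else 0 := by
  rcases Decidable.em (v ∈ xs) with h | h
  · rw [if_pos h]
    exact List.count_eq_one_of_mem (PySem.Set.nodup_ofList xs) ((PySem.Set.mem_ofList xs v).mpr h)
  · simp [h, List.count_eq_zero_of_not_mem (fun hm => h ((PySem.Set.mem_ofList xs v).mp hm))]

theorem solve_spec_aux (A B C : List Int) : solve A B C = solve_alt A B C := by
  unfold solve solve_alt
  apply sorted_id_congr
  have hnd0 : (A.foldl (fun d i => d.insert i 1) (PySem.Dict.empty : PySem.Dict Int Int)).keys.Nodup := by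
    rw [keys_comprehension]; exact PySem.Set.nodup_ofList A
  have hndL : (((PySem.Set.ofList C).foldl solveStep
      ((PySem.Set.ofList B).foldl solveStep
        (A.foldl (fun d i => d.insert i 1) PySem.Dict.empty))).keys).Nodup := by
    rw [keys_hs]
    exact PySem.Set.nodup_update _ _ (by rw [keys_hs]; exact PySem.Set.nodup_update _ _ hnd0)
  refine (List.perm_ext_iff_of_nodup (List.Nodup.filter _ hndL) ?_).mpr ?_
  · exact PySem.Set.nodup_union _ _ (PySem.Set.nodup_union _ _
      (PySem.Set.nodup_inter _ _ (PySem.Set.nodup_ofList A)))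
  · intro x
    rw [List.mem_filter]
    rw [keys_hs, keys_hs, keys_comprehension]
    rw [show (((PySem.Set.ofList C).foldl solveStep
        ((PySem.Set.ofList B).foldl solveStep
          (A.foldl (fun d i => d.insert i 1) PySem.Dict.empty))).getD x 0)
        = (if x ∈ A then 1 else 0) + (if x ∈ B then 1 else 0) + (if x ∈ C then 1 else 0) by
      rw [getD_hs, getD_hs, getD_comprehension, count_ofList, count_ofList,
        PySem.Dict.getD_empty]
      split_ifs <;> push_cast]
    simp only [PySem.Set.mem_update, PySem.Set.mem_union, PySem.Set.mem_inter,
      PySem.Set.mem_ofList, decide_eq_true_eq]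
    by_cases hA : x ∈ A <;> by_cases hB : x ∈ B <;> by_cases hC : x ∈ C <;>
      simp [hA, hB, hC]

-- ===== VERDICT (by name: the statement is the Claim_ definition above) =====
theorem solve_spec : Claim_equal_solve := by
  intro A B C _
  unfold Spec_solve
  exact solve_spec_aux A B C
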